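-- pv_equiv track=rewrite | github.com/JesseWong333/pytorch_deeplearning | core/post_process/lang_model/end_symbol_bs_opt.py | deRepeatInSeq
-- ===== SOURCE A (Python) =====
-- equal_sym_dict = {}
--
-- def deRepeatInSeq(sym):
--     ret = ''
--     # 统一等价标点
--     for c in sym:
--         if c in equal_sym_dict:
--             ret += equal_sym_dict[c]
--         else:
--             ret += c
--
--     # 对连续相同标点去重
--     tmp = ''
--     prev_char = ''
--     for c in ret:
--         if c != prev_char:
--             if c != ' ':
--                 prev_char = c
--             tmp += c
--
--     return tmp
-- ===== SOURCE B (Python) =====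
-- equal_sym_dict = {}
--
-- def deRepeatInSeq(sym):
--     # Mark-then-filter: a position is dropped iff its (mapped) char is non-space
--     # and equals the nearest non-space char before it in the mapped string --
--     # a predicate on the input alone (spaces are always kept and are transparent
--     # to the duplicate test), so the keep decision never consults the output.
--     ret = ''.join(equal_sym_dict.get(c, c) for c in sym)
--     drop = set()
--     last_ns = None
--     for i, c in enumerate(ret):
--         if c != ' ':
--             if c == last_ns:
--                 drop.add(i)
--             last_ns = c
--     return ''.join(c for i, c in enumerate(ret) if i not in drop)
-- ===== Notes on version B (the rewrite author's own statement) =====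
-- stated objective: alternative
-- what changed: Replaces A's stateful keep-then-update dedup loop (prev = last KEPT non-space char of the output) by a mark-then-filter algorithm: a per-position predicate computed from the input alone (drop position i iff its mapped char is non-space and equals the nearest preceding non-space char of the mapped string) marks dropped indices into a set, then a filter pass keeps the unmarked positions; correctness rests on the invariant that A's prev always equals the nearest preceding non-space input char.
import Mathlib
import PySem

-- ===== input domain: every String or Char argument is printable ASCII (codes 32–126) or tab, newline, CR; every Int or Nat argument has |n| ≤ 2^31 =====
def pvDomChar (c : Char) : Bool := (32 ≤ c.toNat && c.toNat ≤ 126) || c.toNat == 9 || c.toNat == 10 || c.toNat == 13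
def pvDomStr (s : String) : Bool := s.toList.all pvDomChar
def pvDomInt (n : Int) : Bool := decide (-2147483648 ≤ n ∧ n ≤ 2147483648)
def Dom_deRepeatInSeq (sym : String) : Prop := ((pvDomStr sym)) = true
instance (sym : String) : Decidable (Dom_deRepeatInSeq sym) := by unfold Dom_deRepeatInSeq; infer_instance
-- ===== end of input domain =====

-- B replaces A's stateful dedup loop by mark-then-filter: dropped positions are computed
-- as a predicate of the input alone (char equals nearest preceding non-space char), then filtered.

-- module-level equal_sym_dict = {} (string values modelled as char lists)
def equalSymDict : PySem.Dict (List Char) (List Char) := PySem.Dict.empty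

-- ===== PORT A =====
-- body of A's first loop: ret += equal_sym_dict[c] if c in dict else c
def mapStep (acc : List Char) (c : Char) : List Char :=
  match PySem.Dict.get? equalSymDict [c] with
  | some v => acc ++ v
  | none => acc ++ [c]

-- body of A's second loop: dedup consecutive, spaces never update prev_char
def dedupStep (st : List Char × List Char) (c : Char) : List Char × List Char :=
  if [c] ≠ st.2 then (st.1 ++ [c], if [c] ≠ [' '] then [c] else st.2) else st

-- two passes, as in A
def deRepeatInSeq (sym : String) : String :=
  let ret := sym.toList.foldl mapStep []
  let res := ret.foldl dedupStep ([], [])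
  String.ofList res.1

-- ===== PORT B =====
-- body of B's marking loop: record index i as dropped iff c non-space and equal to last non-space
def markStep (st : PySem.Set Int × Option Char) (ic : Int × Char) : PySem.Set Int × Option Char :=
  if ic.2 ≠ ' ' then
    ((if some ic.2 = st.2 then PySem.Set.add st.1 ic.1 else st.1), some ic.2)
  else st

def deRepeatInSeq_alt (sym : String) : String :=
  let ret := sym.toList.flatMap (fun c => PySem.Dict.getD equalSymDict [c] [c])
  let drop := ((PySem.List.enumerate ret).foldl markStep (PySem.Set.empty, none)).1
  String.ofList ((PySem.List.enumerate ret).filterMap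
    (fun ic => if ic.1 ∈ drop then none else some ic.2))

-- ===== PRECONDITION & SPEC =====
def Spec_deRepeatInSeq (sym : String) (out : String) : Prop := out = deRepeatInSeq_alt sym
instance (sym : String) (out : String) : Decidable (Spec_deRepeatInSeq sym out) := by unfold Spec_deRepeatInSeq; infer_instance

-- ===== CLAIM (what is proved, stated in full; the proofs are below) =====
def Claim_equal_deRepeatInSeq : Prop := ∀ (sym : String), Dom_deRepeatInSeq sym → Spec_deRepeatInSeq sym (deRepeatInSeq sym)

-- ===== LEMMAS AND PROOFS =====

-- common specification spine: space-transparent consecutive dedup with unconditional last update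
def dedupR : List Char → Option Char → List Char
  | [], _ => []
  | c :: t, last =>
    if c = ' ' then c :: dedupR t last
    else if some c = last then dedupR t (some c)
    else c :: dedupR t (some c)

-- A's first pass over the empty dict is the identity
theorem firstPass_id (l acc : List Char) : l.foldl mapStep acc = acc ++ l := by
  induction l generalizing acc with
  | nil => simp
  | cons c t ih =>
    rw [List.foldl_cons, ih]
    simp [mapStep, equalSymDict, PySem.Dict.get?, PySem.Dict.empty]

-- B's mapped string over the empty dict is the identity
theorem mapB_id (l : List Char) :
    l.flatMap (fun c => PySem.Dict.getD equalSymDict [c] [c]) = l := by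
  induction l with
  | nil => rfl
  | cons c t ih => simp [List.flatMap_cons, equalSymDict, PySem.Dict.getD,
      PySem.Dict.get?, PySem.Dict.empty]

-- one B marking step, in closed form
theorem markStep_eq (S : PySem.Set Int) (last : Option Char) (s : Int) (c : Char) :
    markStep (S, last) (s, c)
      = (if c ≠ ' ' ∧ some c = last then PySem.Set.add S s else S,
         if c ≠ ' ' then some c else last) := by
  unfold markStep
  by_cases hs : c = ' ' <;> by_cases hl : some c = last <;> simp [hs, hl]

-- relation between A's prev_char string and the optional last non-space char
def encR (prev : List Char) (last : Option Char) : Prop :=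
  (prev = [] ∧ last = none) ∨ (∃ c, c ≠ ' ' ∧ prev = [c] ∧ last = some c)

-- A's dedup pass computes dedupR
theorem A_fold_dedupR (l : List Char) (out prev : List Char) (last : Option Char)
    (h : encR prev last) : (l.foldl dedupStep (out, prev)).1 = out ++ dedupR l last := by
  induction l generalizing out prev last with
  | nil => simp [dedupR]
  | cons c t ih =>
    rw [List.foldl_cons]
    by_cases hs : c = ' '
    · subst hs
      have hne : [' '] ≠ prev := by
        rcases h with ⟨h1, _⟩ | ⟨c', hc', h1, _⟩ <;> simp [h1]
        intro he; exact hc' he.symm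
      rw [show dedupStep (out, prev) ' ' = (out ++ [' '], prev) by
        simp [dedupStep, hne]]
      rw [ih _ _ last h]
      simp [dedupR]
    · by_cases hl : some c = last
      · rcases h with ⟨_, h2⟩ | ⟨c', hc', h1, h2⟩
        · simp [h2] at hl
        · have hcc : c = c' := by rw [h2] at hl; exact Option.some.inj hl
          subst hcc
          rw [show dedupStep (out, prev) c = (out, prev) by simp [dedupStep, h1]]
          rw [ih _ _ last (Or.inr ⟨c, hc', h1, h2⟩)]
          simp [dedupR, hs, hl]
      · have hne : [c] ≠ prev := by
          rcases h with ⟨h1, _⟩ | ⟨c', hc', h1, h2⟩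
          · simp [h1]
          · simp [h1]; intro he; exact hl (by rw [he, h2])
        rw [show dedupStep (out, prev) c = (out ++ [c], [c]) by
          simp [dedupStep, hne, hs]]
        rw [ih _ _ (some c) (Or.inr ⟨c, hs, rfl, rfl⟩)]
        simp [dedupR, hs, hl]

-- indices below the enumeration start are never added by the marking fold
theorem mark_mono (l : List Char) (s : Int) (S : PySem.Set Int) (last : Option Char)
    (j : Int) (hj : j < s) :
    (j ∈ ((PySem.List.enumerate l s).foldl markStep (S, last)).1) ↔ j ∈ S := by
  induction l generalizing s S last with
  | nil => simp [PySem.List.enumerate_nil]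
  | cons c t ih =>
    rw [PySem.List.enumerate_cons, List.foldl_cons, markStep_eq]
    by_cases hs : c = ' '
    · rw [if_neg (by simp [hs] : ¬(c ≠ ' ' ∧ some c = last)),
          if_neg (by simp [hs] : ¬c ≠ ' ')]
      exact ih (s + 1) S last (by omega)
    · by_cases hl : some c = last
      · rw [if_pos ⟨hs, hl⟩, if_pos hs, ih (s + 1) _ _ (by omega), PySem.Set.mem_add]
        constructor
        · rintro (h | h)
          · exact h
          · omega
        · exact Or.inl
      · rw [if_neg (fun h => hl h.2), if_pos hs]
        exact ih (s + 1) S (some c) (by omega)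

-- B's filter pass against the final marked set computes dedupR
theorem B_filter_dedupR (l : List Char) (s : Int) (S : PySem.Set Int) (last : Option Char)
    (hS : ∀ j ∈ S, j < s) :
    (PySem.List.enumerate l s).filterMap
      (fun ic => if ic.1 ∈ ((PySem.List.enumerate l s).foldl markStep (S, last)).1
                 then none else some ic.2)
      = dedupR l last := by
  induction l generalizing s S last with
  | nil => simp [PySem.List.enumerate_nil, dedupR]
  | cons c t ih =>
    rw [PySem.List.enumerate_cons, List.foldl_cons, markStep_eq, List.filterMap_cons]
    by_cases hs : c = ' '
    · rw [if_neg (by simp [hs] : ¬(c ≠ ' ' ∧ some c = last)),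
          if_neg (by simp [hs] : ¬c ≠ ' ')]
      have hmem : s ∉ ((PySem.List.enumerate t (s+1)).foldl markStep (S, last)).1 := by
        rw [mark_mono t (s+1) S last s (by omega)]
        exact fun h => absurd (hS s h) (lt_irrefl s)
      rw [if_neg hmem]
      show c :: _ = dedupR (c :: t) last
      rw [show dedupR (c :: t) last = c :: dedupR t last by simp [dedupR, hs]]
      exact congrArg (c :: ·) (ih (s+1) S last (fun j hj => by have := hS j hj; omega))
    · by_cases hl : some c = last
      · rw [if_pos (show c ≠ ' ' ∧ some c = last from ⟨hs, hl⟩), if_pos hs]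
        have hmem : s ∈ ((PySem.List.enumerate t (s+1)).foldl markStep (PySem.Set.add S s, some c)).1 := by
          rw [mark_mono t (s+1) _ _ s (by omega), PySem.Set.mem_add]
          exact Or.inr rfl
        rw [if_pos hmem]
        show List.filterMap _ _ = dedupR (c :: t) last
        rw [show dedupR (c :: t) last = dedupR t (some c) by simp [dedupR, hs, hl]]
        exact ih (s+1) (PySem.Set.add S s) (some c)
          (fun j hj => by
            rw [PySem.Set.mem_add] at hj
            rcases hj with h | h
            · have := hS j h; omega
            · omega)
      · rw [if_neg (show ¬(c ≠ ' ' ∧ some c = last) from fun h => hl h.2), if_pos hs]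
        have hmem : s ∉ ((PySem.List.enumerate t (s+1)).foldl markStep (S, some c)).1 := by
          rw [mark_mono t (s+1) S (some c) s (by omega)]
          exact fun h => absurd (hS s h) (lt_irrefl s)
        rw [if_neg hmem]
        show c :: _ = dedupR (c :: t) last
        rw [show dedupR (c :: t) last = c :: dedupR t (some c) by simp [dedupR, hs, hl]]
        exact congrArg (c :: ·) (ih (s+1) S (some c) (fun j hj => by have := hS j hj; omega))

-- ===== VERDICT (by name: the statement is the Claim_ definition above) =====
theorem deRepeatInSeq_spec : Claim_equal_deRepeatInSeq := by
  intro sym _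
  show String.ofList ((sym.toList.foldl mapStep []).foldl dedupStep ([], [])).1
     = String.ofList ((PySem.List.enumerate
          (sym.toList.flatMap fun c => PySem.Dict.getD equalSymDict [c] [c])).filterMap
        (fun ic => if ic.1 ∈ ((PySem.List.enumerate
            (sym.toList.flatMap fun c => PySem.Dict.getD equalSymDict [c] [c])).foldl
            markStep (PySem.Set.empty, none)).1 then none else some ic.2))
  rw [firstPass_id, mapB_id, List.nil_append,
      A_fold_dedupR sym.toList [] [] none (Or.inl ⟨rfl, rfl⟩), List.nil_append,
      B_filter_dedupR sym.toList 0 PySem.Set.empty none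
        (by intro j hj; simp [PySem.Set.empty] at hj)]
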